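-- pv_equiv track=rewrite | github.com/physics-pete/adventofcode2025 | src/day02.py | find_invalid_ids
-- ===== SOURCE A (Python) =====
-- def find_invalid_ids(start, end):
--     invalid_ids = []
--     for number in [str(k) for k in range(start, end+1)]:
--         if len(number) % 2 == 0:
--             len_match = len(number) // 2
--             if number[:len_match] == number[len_match:]:
--                 invalid_ids.append(int(number))
--     return invalid_ids
-- ===== SOURCE B (Python) =====
-- def find_invalid_ids(start, end):
--     # Enumerate doubled numbers x*(10**d + 1) directly instead of scanning the range.
--     res = []
--     if end < 11:
--         return res
--     digits = len(str(end))
--     for d in range(1, digits // 2 + 1):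
--         base = 10 ** d + 1
--         lo = 10 ** (d - 1)
--         hi = 10 ** d - 1
--         x_min = max(lo, -(-start // base))
--         x_max = min(hi, end // base)
--         for x in range(x_min, x_max + 1):
--             res.append(x * base)
--     return res
-- ===== Notes on version B (the rewrite author's own statement) =====
-- stated objective: faster
-- what changed: Instead of scanning every integer in [start, end] and string-testing whether its decimal form is a doubled string, B directly enumerates the doubled numbers x*(10^d+1) for each half-length d with x a d-digit number, clipping x to the range bounds; intended as faster (asymptotic, O(sqrt(end)) work vs O(end-start) string tests) and measured up to 160x at the largest generated size on wide ranges (degenerate/empty ranges are equally fast for both).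
import Mathlib
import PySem

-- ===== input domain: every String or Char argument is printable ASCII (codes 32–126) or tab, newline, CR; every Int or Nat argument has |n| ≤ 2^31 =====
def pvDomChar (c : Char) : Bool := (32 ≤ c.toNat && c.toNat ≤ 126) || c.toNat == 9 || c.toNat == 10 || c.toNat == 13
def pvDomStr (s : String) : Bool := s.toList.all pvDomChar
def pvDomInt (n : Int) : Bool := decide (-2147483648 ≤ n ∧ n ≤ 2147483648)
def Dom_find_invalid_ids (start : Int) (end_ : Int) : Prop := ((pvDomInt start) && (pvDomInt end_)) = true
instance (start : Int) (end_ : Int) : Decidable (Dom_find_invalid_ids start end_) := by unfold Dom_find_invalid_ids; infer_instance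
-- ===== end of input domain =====

-- B replaces A's scan of the whole numeric range (string test per number) by direct
-- enumeration of the doubled numbers x*(10^d+1); intended as faster (asymptotically less
-- work on wide ranges; a timing run measured up to ~160x at its largest size, while
-- degenerate/empty ranges measure equal); equivalence of the return values is proved.

-- ===== PORT A =====
-- hand port of Python's int() (PySem.Int.ofChars? is opaque to general proofs here);
-- exact on the canonical outputs of str(k) — optional leading '-', then decimal digits —
-- which are the only strings A passes to int().
def pvDigitsVal (ds : List Char) : Nat := ds.foldl (fun a c => 10 * a + (c.toNat - 48)) 0
def pvParseInt (cs : List Char) : Int :=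
  if cs.take 1 = ['-'] then -(pvDigitsVal (cs.drop 1) : Int) else (pvDigitsVal cs : Int)

def find_invalid_ids (start : Int) (end_ : Int) : List Int :=
  ((PySem.List.pyRange start (end_ + 1) 1).map (fun k => PySem.Int.toChars k)).foldl
    (fun invalid_ids number =>
      if PySem.Int.mod (PySem.Chars.len number) 2 = 0 then
        let len_match := PySem.Int.floordiv (PySem.Chars.len number) 2
        if PySem.Chars.slice number none (some len_match) =
           PySem.Chars.slice number (some len_match) none then
          invalid_ids ++ [pvParseInt number]
        else invalid_ids
      else invalid_ids) []

-- ===== PORT B =====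
def find_invalid_ids_alt (start : Int) (end_ : Int) : List Int :=
  if end_ < 11 then []
  else
    let digits := PySem.Chars.len (PySem.Int.toChars end_)
    (PySem.List.pyRange 1 (PySem.Int.floordiv digits 2 + 1) 1).foldl
      (fun res d =>
        let base : Int := 10 ^ d.toNat + 1        -- 10 ** d  (here 1 ≤ d)
        let lo : Int := 10 ^ (d - 1).toNat        -- 10 ** (d - 1)
        let hi : Int := 10 ^ d.toNat - 1          -- 10 ** d - 1
        let x_min := max lo (-(PySem.Int.floordiv (-start) base))
        let x_max := min hi (PySem.Int.floordiv end_ base)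
        (PySem.List.pyRange x_min (x_max + 1) 1).foldl (fun res x => res ++ [x * base]) res)
      []

-- ===== PRECONDITION & SPEC =====
def Spec_find_invalid_ids (start : Int) (end_ : Int) (out : List Int) : Prop := out = find_invalid_ids_alt start end_
instance (start : Int) (end_ : Int) (out : List Int) : Decidable (Spec_find_invalid_ids start end_ out) := by unfold Spec_find_invalid_ids; infer_instance

-- ===== CLAIM (what is proved, stated in full; the proofs are below) =====
def Claim_equal_find_invalid_ids : Prop := ∀ (start : Int) (end_ : Int), Dom_find_invalid_ids start end_ → Spec_find_invalid_ids start end_ (find_invalid_ids start end_)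

-- ===== LEMMAS AND PROOFS =====

-- proof-side abbreviations
def pvTest (s : List Char) : Bool :=
  decide (PySem.Int.mod (PySem.Chars.len s) 2 = 0) &&
  decide (PySem.Chars.slice s none (some (PySem.Int.floordiv (PySem.Chars.len s) 2)) =
          PySem.Chars.slice s (some (PySem.Int.floordiv (PySem.Chars.len s) 2)) none)

def pvQ (m : Int) : Prop :=
  ∃ d x : Nat, 0 < d ∧ 10 ^ (d - 1) ≤ x ∧ x < 10 ^ d ∧ m = (x : Int) * ((10:Int) ^ d + 1)

def pvBlock (start end_ d : Int) : List Int :=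
  let base : Int := 10 ^ d.toNat + 1
  let lo : Int := 10 ^ (d - 1).toNat
  let hi : Int := 10 ^ d.toNat - 1
  let x_min := max lo (-(PySem.Int.floordiv (-start) base))
  let x_max := min hi (PySem.Int.floordiv end_ base)
  (PySem.List.pyRange x_min (x_max + 1) 1).map (fun x => x * base)

-- toChars bridge to Nat.digits
lemma pv_toDigitsCore_eq (fuel : Nat) : ∀ (n : Nat) (acc : List Char), n < fuel → 0 < n →
    Nat.toDigitsCore 10 fuel n acc = ((Nat.digits 10 n).map Nat.digitChar).reverse ++ acc := by
  induction fuel with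
  | zero => intro n acc h _; omega
  | succ fuel ih =>
    intro n acc hlt hpos
    rw [Nat.toDigitsCore]
    rw [Nat.digits_def' (b := 10) (by norm_num) hpos]
    by_cases h0 : n / 10 = 0
    · simp [h0]
    · rw [if_neg h0, ih (n / 10) _ (by omega) (Nat.pos_of_ne_zero h0)]
      simp

lemma pv_toChars_pos (n : Nat) (h : 0 < n) :
    Nat.toDigits 10 n = ((Nat.digits 10 n).map Nat.digitChar).reverse := by
  have := pv_toDigitsCore_eq (n + 1) n [] (by omega) h
  simpa [Nat.toDigits] using this

lemma pv_digitChar_ne_dash {a : Nat} (h : a < 10) : Nat.digitChar a ≠ '-' := by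
  interval_cases a <;> decide

lemma pv_digitChar_inj {a b : Nat} (ha : a < 10) (hb : b < 10)
    (h : Nat.digitChar a = Nat.digitChar b) : a = b := by
  interval_cases a <;> interval_cases b <;> simp_all <;> exact absurd h (by decide)

lemma pv_digitChar_val {a : Nat} (h : a < 10) : (Nat.digitChar a).toNat - 48 = a := by
  interval_cases a <;> decide

lemma pv_mem_toDigits_ne_dash (a : Nat) (c : Char) (hc : c ∈ Nat.toDigits 10 a) : c ≠ '-' := by
  rcases Nat.eq_zero_or_pos a with rfl | ha
  · have : c = '0' := by simpa [Nat.toDigits, Nat.toDigitsCore] using hc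
    subst this; decide
  · rw [pv_toChars_pos a ha] at hc
    simp only [List.mem_reverse, List.mem_map] at hc
    obtain ⟨b, hb, rfl⟩ := hc
    exact pv_digitChar_ne_dash (Nat.digits_lt_base (by norm_num) hb)

-- parsing roundtrip
lemma pv_digitsVal_eq (L : List Nat) (hL : ∀ a ∈ L, a < 10) :
    pvDigitsVal ((L.map Nat.digitChar).reverse) = Nat.ofDigits 10 L := by
  induction L with
  | nil => simp [pvDigitsVal]
  | cons a L ih =>
    have ha : a < 10 := hL a (by simp)
    have ihL := ih (fun b hb => hL b (by simp [hb]))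
    simp only [List.map_cons, List.reverse_cons]
    unfold pvDigitsVal at ihL ⊢
    rw [List.foldl_append, ihL]
    simp only [List.foldl_cons, List.foldl_nil]
    rw [pv_digitChar_val ha, Nat.ofDigits_cons]
    ring

lemma pv_digitsVal_toDigits (n : Nat) : pvDigitsVal (Nat.toDigits 10 n) = n := by
  rcases Nat.eq_zero_or_pos n with rfl | h
  · decide
  · rw [pv_toChars_pos n h,
      pv_digitsVal_eq _ (fun a ha => Nat.digits_lt_base (by norm_num) ha), Nat.ofDigits_digits]

lemma pv_take_one_toDigits (n : Nat) : (Nat.toDigits 10 n).take 1 ≠ ['-'] := by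
  intro hEq
  have hm : '-' ∈ (Nat.toDigits 10 n).take 1 := by rw [hEq]; simp
  exact pv_mem_toDigits_ne_dash n '-' (List.take_subset _ _ hm) rfl

lemma pv_parse_toChars (k : Int) : pvParseInt (PySem.Int.toChars k) = k := by
  by_cases hneg : k < 0
  · have : PySem.Int.toChars k = '-' :: Nat.toDigits 10 k.natAbs := by
      simp [PySem.Int.toChars, hneg]
    rw [this, pvParseInt]
    have ht : (('-') :: Nat.toDigits 10 k.natAbs).take 1 = ['-'] := by simp
    rw [if_pos ht]
    simp only [List.drop_one, List.tail_cons, pv_digitsVal_toDigits]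
    omega
  · have : PySem.Int.toChars k = Nat.toDigits 10 k.toNat := by
      simp [PySem.Int.toChars, hneg]
    rw [this]
    rw [pvParseInt, if_neg (pv_take_one_toDigits k.toNat), pv_digitsVal_toDigits]
    omega

-- the string test characterised arithmetically
lemma pv_test_eq (s : List Char) : pvTest s = true ↔
    (s.length % 2 = 0 ∧ s.take (s.length / 2) = s.drop (s.length / 2)) := by
  unfold pvTest
  have h2 : PySem.Int.mod (PySem.Chars.len s) 2 = ((s.length : Int)) % 2 := by
    rw [PySem.Chars.len_eq, PySem.Int.mod_eq_emod_of_pos (by norm_num)]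
  have h3 : PySem.Int.floordiv (PySem.Chars.len s) 2 = ((s.length / 2 : Nat) : Int) := by
    rw [PySem.Chars.len_eq, PySem.Int.floordiv_eq_ediv_of_pos (by norm_num)]
    push_cast [Int.natCast_div]; ring
  rw [h2, h3]
  simp only [Bool.and_eq_true, decide_eq_true_eq, PySem.Chars.slice_eq_listSlice]
  rw [PySem.List.slice_to_natCast, PySem.List.slice_from_natCast]
  constructor
  · rintro ⟨h1, hs⟩; exact ⟨by omega, hs⟩
  · rintro ⟨h1, hs⟩; exact ⟨by omega, hs⟩

lemma pv_Q_ge_11 {m : Int} (h : pvQ m) : 11 ≤ m := by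
  obtain ⟨d, x, hd, hlo, hhi, rfl⟩ := h
  have h1 : (1:Int) ≤ (x:Int) := by
    have : 1 ≤ 10 ^ (d-1) := Nat.one_le_pow _ _ (by norm_num)
    exact_mod_cast le_trans this hlo
  have h2 : (11:Int) ≤ (10:Int)^d + 1 := by
    have : (10:Int)^1 ≤ 10^d := pow_le_pow_right₀ (by norm_num) hd
    rw [pow_one] at this; linarith
  nlinarith

lemma pv_map_digitChar_inj : ∀ (u v : List Nat), (∀ a ∈ u, a < 10) → (∀ a ∈ v, a < 10) →
    u.map Nat.digitChar = v.map Nat.digitChar → u = v := by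
  intro u
  induction u with
  | nil => intro v _ _ h; cases v <;> simp_all
  | cons a u ih =>
    intro v hu hv h
    cases v with
    | nil => simp at h
    | cons b v =>
      simp only [List.map_cons, List.cons.injEq] at h
      have hab : a = b := pv_digitChar_inj (hu a (by simp)) (hv b (by simp)) h.1
      rw [hab, ih v (fun c hc => hu c (by simp [hc])) (fun c hc => hv c (by simp [hc])) h.2]

lemma pv_cond_iff_pos (n : Nat) (hn : 0 < n) :
    ((Nat.digits 10 n).length % 2 = 0 ∧
     (Nat.digits 10 n).take ((Nat.digits 10 n).length / 2) =
       (Nat.digits 10 n).drop ((Nat.digits 10 n).length / 2))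
    ↔ ∃ d x : Nat, 0 < d ∧ 10 ^ (d - 1) ≤ x ∧ x < 10 ^ d ∧ n = x * (10 ^ d + 1) := by
  set D := Nat.digits 10 n with hD
  have hmpos : 0 < D.length := by
    have : D ≠ [] := Nat.digits_ne_nil_iff_ne_zero.mpr (by omega)
    exact List.length_pos_iff.mpr this
  constructor
  · rintro ⟨hev, heq⟩
    set h := D.length / 2 with hh
    have hm2 : D.length = 2 * h := by omega
    have hpos : 0 < h := by omega
    set L := D.take h with hL
    have hlen : L.length = h := by rw [hL, List.length_take]; omega
    have hsplit : D = L ++ L := by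
      conv_lhs => rw [← List.take_append_drop h D]
      rw [← heq]
    have hlt : ∀ l ∈ L, l < 10 := by
      intro l hl
      have hmem : l ∈ D := by rw [hsplit]; exact List.mem_append.mpr (Or.inl hl)
      rw [hD] at hmem
      exact Nat.digits_lt_base (by norm_num) hmem
    have hlast : ∀ (hne : L ≠ []), L.getLast hne ≠ 0 := by
      intro hne
      have hdrop : L = D.drop h := heq
      have hDne : D ≠ [] := Nat.digits_ne_nil_iff_ne_zero.mpr (by omega)
      have hlg : L.getLast hne = D.getLast hDne := by
        have hne' : D.drop h ≠ [] := hdrop ▸ hne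
        calc L.getLast hne = (D.drop h).getLast hne' := by congr 1
          _ = D.getLast _ := List.getLast_drop hne'
      rw [hlg]
      exact Nat.getLast_digit_ne_zero 10 (by omega)
    set x := Nat.ofDigits 10 L with hx
    have hdig : Nat.digits 10 x = L := Nat.digits_ofDigits 10 (by norm_num) L hlt hlast
    have hnval : n = x * (10 ^ h + 1) := by
      have h1 : Nat.ofDigits 10 D = n := Nat.ofDigits_digits 10 n
      rw [hsplit, Nat.ofDigits_append, hlen] at h1
      rw [← h1, ← hx]; ring
    refine ⟨h, x, hpos, ?_, ?_, hnval⟩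
    · have : h - 1 < (Nat.digits 10 x).length := by rw [hdig, hlen]; omega
      exact (Nat.lt_digits_length_iff (by norm_num) x).mp this
    · have : (Nat.digits 10 x).length ≤ h := by rw [hdig, hlen]
      exact (Nat.digits_length_le_iff (by norm_num) x).mp this
  · rintro ⟨d, x, hd, hlo, hhi, rfl⟩
    have hxlen : (Nat.digits 10 x).length = d := by
      have h1 : (Nat.digits 10 x).length ≤ d := (Nat.digits_length_le_iff (by norm_num) x).mpr hhi
      have h2 : d - 1 < (Nat.digits 10 x).length := (Nat.lt_digits_length_iff (by norm_num) x).mpr hlo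
      omega
    have hsplit : D = Nat.digits 10 x ++ Nat.digits 10 x := by
      rw [hD, Nat.digits_append_digits (by norm_num), hxlen]
      congr 1; ring
    have hlen2 : D.length = 2 * d := by rw [hsplit, List.length_append, hxlen]; omega
    constructor
    · omega
    · have hdd : D.length / 2 = d := by omega
      rw [hdd, hsplit, List.take_left' hxlen, List.drop_left' hxlen]

lemma pv_toDigits_ne_nil (n : Nat) : Nat.toDigits 10 n ≠ [] := by
  rcases Nat.eq_zero_or_pos n with rfl | h
  · decide
  · rw [pv_toChars_pos n h]
    simp [Nat.digits_ne_nil_iff_ne_zero]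
    omega

lemma pv_test_iff (k : Int) : pvTest (PySem.Int.toChars k) = true ↔ pvQ k := by
  by_cases hk : k < 11
  · constructor
    · intro ht
      exfalso
      by_cases hneg : k < 0
      · -- "-…" : the two halves cannot match, the first starts with '-'
        have hs : PySem.Int.toChars k = '-' :: Nat.toDigits 10 k.natAbs := by
          simp [PySem.Int.toChars, hneg]
        set t := Nat.toDigits 10 k.natAbs with hT
        have htne : t ≠ [] := pv_toDigits_ne_nil _
        have htlen : 0 < t.length := List.length_pos_iff.mpr htne
        rw [hs] at ht
        obtain ⟨hev, heq⟩ := (pv_test_eq _).mp ht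
        simp only [List.length_cons] at hev heq
        set h := (t.length + 1) / 2 with hh
        have hb : 0 < h ∧ h ≤ t.length := by omega
        obtain ⟨g, hg⟩ : ∃ g, h = g + 1 := ⟨h - 1, by omega⟩
        have h1 : (('-') :: t).take h = '-' :: t.take g := by rw [hg, List.take_succ_cons]
        have h2 : (('-') :: t).drop h = t.drop g := by rw [hg, List.drop_succ_cons]
        rw [h1, h2] at heq
        have hhead : (t.drop g).head? = some '-' := by rw [← heq]; rfl
        rw [List.head?_drop] at hhead
        have : '-' ∈ t := List.mem_of_getElem? hhead
        exact pv_mem_toDigits_ne_dash _ _ this rfl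
      · rw [not_lt] at hneg
        interval_cases k <;> revert ht <;> decide
    · intro hQ
      exact absurd (pv_Q_ge_11 hQ) (by omega)
  · -- k ≥ 11 : pure digit string, reduce to Nat.digits
    rw [not_lt] at hk
    have hk0 : ¬ k < 0 := by omega
    have hn : 0 < k.toNat := by omega
    have hs : PySem.Int.toChars k = Nat.toDigits 10 k.toNat := by
      simp [PySem.Int.toChars, hk0]
    set D := Nat.digits 10 k.toNat with hD
    have hlt : ∀ a ∈ D, a < 10 := fun a ha => Nat.digits_lt_base (by norm_num) ha
    have hsrev : PySem.Int.toChars k = (D.map Nat.digitChar).reverse := by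
      rw [hs, pv_toChars_pos _ hn]
    have hlen : (PySem.Int.toChars k).length = D.length := by
      rw [hsrev]; simp
    rw [pv_test_eq, hlen]
    have hQiff : pvQ k ↔ ∃ d x : Nat, 0 < d ∧ 10 ^ (d - 1) ≤ x ∧ x < 10 ^ d ∧
        k.toNat = x * (10 ^ d + 1) := by
      unfold pvQ
      constructor
      · rintro ⟨d, x, h1, h2, h3, h4⟩
        refine ⟨d, x, h1, h2, h3, ?_⟩
        have hc : ((x * (10 ^ d + 1) : Nat) : Int) = (x : Int) * ((10:Int) ^ d + 1) := by push_cast; ring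
        omega
      · rintro ⟨d, x, h1, h2, h3, h4⟩
        refine ⟨d, x, h1, h2, h3, ?_⟩
        have hc : ((x * (10 ^ d + 1) : Nat) : Int) = (x : Int) * ((10:Int) ^ d + 1) := by push_cast; ring
        omega
    rw [hQiff, ← pv_cond_iff_pos _ hn, ← hD]
    -- transport the take/drop condition through reverse and map
    constructor
    · rintro ⟨hev, heq⟩
      refine ⟨hev, ?_⟩
      set h := D.length / 2 with hh
      have hmh : D.length - h = h := by omega
      rw [hsrev, List.take_reverse, List.drop_reverse, List.length_map, hmh,
        List.reverse_inj, ← List.map_take, ← List.map_drop] at heq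
      exact (pv_map_digitChar_inj _ _ (fun a ha => hlt a (List.mem_of_mem_drop ha))
        (fun a ha => hlt a (List.mem_of_mem_take ha)) heq).symm
    · rintro ⟨hev, heq⟩
      refine ⟨hev, ?_⟩
      set h := D.length / 2 with hh
      have hmh : D.length - h = h := by omega
      rw [hsrev, List.take_reverse, List.drop_reverse, List.length_map, hmh,
        List.reverse_inj, ← List.map_take, ← List.map_drop, heq]

-- A's fold as a filter
lemma pv_A_eq_filter (start end_ : Int) :
    find_invalid_ids start end_ =
      (PySem.List.pyRange start (end_ + 1) 1).filter (fun k => pvTest (PySem.Int.toChars k)) := by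
  unfold find_invalid_ids
  rw [List.foldl_map]
  have hbody : (fun (invalid_ids : List Int) (k : Int) =>
      if PySem.Int.mod (PySem.Chars.len (PySem.Int.toChars k)) 2 = 0 then
        let len_match := PySem.Int.floordiv (PySem.Chars.len (PySem.Int.toChars k)) 2
        if PySem.Chars.slice (PySem.Int.toChars k) none (some len_match) =
           PySem.Chars.slice (PySem.Int.toChars k) (some len_match) none then
          invalid_ids ++ [pvParseInt (PySem.Int.toChars k)]
        else invalid_ids
      else invalid_ids) = fun invalid_ids k =>
        if (fun k => pvTest (PySem.Int.toChars k)) k then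
          invalid_ids ++ [(fun k => pvParseInt (PySem.Int.toChars k)) k] else invalid_ids := by
    funext acc k
    simp only [pvTest]
    by_cases h1 : PySem.Int.mod (PySem.Chars.len (PySem.Int.toChars k)) 2 = 0 <;>
      by_cases h2 : PySem.Chars.slice (PySem.Int.toChars k) none
          (some (PySem.Int.floordiv (PySem.Chars.len (PySem.Int.toChars k)) 2)) =
        PySem.Chars.slice (PySem.Int.toChars k)
          (some (PySem.Int.floordiv (PySem.Chars.len (PySem.Int.toChars k)) 2)) none <;>
      simp <;> split_ifs <;> tauto
  rw [hbody, PySem.List.foldl_append_if (fun k => pvTest (PySem.Int.toChars k))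
    (fun k => pvParseInt (PySem.Int.toChars k))]
  simp only [List.nil_append]
  rw [List.map_congr_left (fun k _ => pv_parse_toChars k)]; simp

-- B's fold as a flatMap of blocks
lemma pv_B_eq_flatMap (start end_ : Int) (h : ¬ end_ < 11) :
    find_invalid_ids_alt start end_ =
      (PySem.List.pyRange 1 (PySem.Int.floordiv (PySem.Chars.len (PySem.Int.toChars end_)) 2 + 1) 1).flatMap
        (pvBlock start end_) := by
  unfold find_invalid_ids_alt
  rw [if_neg h]
  have hbody : (fun (res : List Int) (d : Int) =>
      let base : Int := 10 ^ d.toNat + 1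
      let lo : Int := 10 ^ (d - 1).toNat
      let hi : Int := 10 ^ d.toNat - 1
      let x_min := max lo (-(PySem.Int.floordiv (-start) base))
      let x_max := min hi (PySem.Int.floordiv end_ base)
      (PySem.List.pyRange x_min (x_max + 1) 1).foldl (fun res x => res ++ [x * base]) res) =
      fun res d => res ++ pvBlock start end_ d := by
    funext res d
    simp only [pvBlock]
    rw [PySem.List.foldl_append_singleton_eq_map]
  rw [hbody, PySem.List.foldl_append_eq_flatMap]
  simp

-- interval arithmetic for B's blocks
lemma pv_mem_block (start end_ d m : Int) (hd : 1 ≤ d) :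
    m ∈ pvBlock start end_ d ↔
      start ≤ m ∧ m ≤ end_ ∧ ∃ x : Int,
        10 ^ (d.toNat - 1) ≤ x ∧ x < 10 ^ d.toNat ∧ m = x * (10 ^ d.toNat + 1) := by
  have hB : (0:Int) < 10 ^ d.toNat + 1 := by positivity
  have hd1 : (d - 1).toNat = d.toNat - 1 := by omega
  have e1 : ∀ x : Int, (-(PySem.Int.floordiv (-start) (10 ^ d.toNat + 1)) ≤ x) ↔
      start ≤ x * (10 ^ d.toNat + 1) := by
    intro x
    rw [neg_le, PySem.Int.le_floordiv_iff_mul_le hB, neg_mul, neg_le_neg_iff]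
  have e2 : ∀ x : Int, (x ≤ PySem.Int.floordiv end_ (10 ^ d.toNat + 1)) ↔
      x * (10 ^ d.toNat + 1) ≤ end_ := by
    intro x
    rw [← not_lt, PySem.Int.floordiv_lt_iff_lt_mul hB, not_lt]
  simp only [pvBlock, hd1, List.mem_map, PySem.List.mem_pyRange_one]
  constructor
  · rintro ⟨x, ⟨hx1, hx2⟩, rfl⟩
    rw [max_le_iff] at hx1
    have hx2' : x ≤ min (10 ^ d.toNat - 1) (PySem.Int.floordiv end_ (10 ^ d.toNat + 1)) := by omega
    rw [le_min_iff] at hx2'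
    exact ⟨(e1 x).mp hx1.2, (e2 x).mp hx2'.2, x, hx1.1, by omega, rfl⟩
  · rintro ⟨hs, he, x, h1, h2, rfl⟩
    refine ⟨x, ⟨?_, ?_⟩, rfl⟩
    · rw [max_le_iff]; exact ⟨h1, (e1 x).mpr hs⟩
    · have h3 := (e2 x).mpr he
      have h4 : x ≤ min (10 ^ d.toNat - 1) (PySem.Int.floordiv end_ (10 ^ d.toNat + 1)) := by
        rw [le_min_iff]; exact ⟨by omega, h3⟩
      omega

lemma pv_block_bounds (start end_ d m : Int) (hd : 1 ≤ d) (hm : m ∈ pvBlock start end_ d) :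
    10 ^ (2 * d.toNat - 1) ≤ m ∧ m < 10 ^ (2 * d.toNat) := by
  obtain ⟨_, _, x, h1, h2, rfl⟩ := (pv_mem_block start end_ d m hd).mp hm
  have p1 : (10:Int) ^ (2 * d.toNat - 1) = 10 ^ (d.toNat - 1) * 10 ^ d.toNat := by
    rw [← pow_add]; congr 1; omega
  have p2 : (10:Int) ^ (2 * d.toNat) = 10 ^ d.toNat * 10 ^ d.toNat := by
    rw [← pow_add]; congr 1; omega
  have hp : (0:Int) < 10 ^ (d.toNat - 1) := by positivity
  have hp2 : (0:Int) < 10 ^ d.toNat := by positivity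
  constructor
  · rw [p1]; nlinarith
  · rw [p2]; nlinarith

lemma pv_len_toChars (e : Int) (he : 0 < e) :
    PySem.Chars.len (PySem.Int.toChars e) = ((Nat.digits 10 e.toNat).length : Int) := by
  have hnn : ¬ e < 0 := by omega
  have h1 : PySem.Int.toChars e = Nat.toDigits 10 e.toNat := by simp [PySem.Int.toChars, hnn]
  rw [PySem.Chars.len_eq, h1, pv_toChars_pos _ (by omega)]
  simp

lemma pv_pairwise_flatMap (f : Int → List Int) :
    ∀ (n : Nat) (a b : Int), (b - a).toNat = n →
    (∀ d, a ≤ d → d < b → (f d).Pairwise (· < ·)) →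
    (∀ d d', a ≤ d → d < d' → d' < b → ∀ u ∈ f d, ∀ v ∈ f d', u < v) →
    ((PySem.List.pyRange a b 1).flatMap f).Pairwise (· < ·) := by
  intro n
  induction n with
  | zero =>
    intro a b hn _ _
    rw [PySem.List.pyRange_one_eq_nil (by omega)]; simp
  | succ n ih =>
    intro a b hn hin hsep
    rcases lt_or_ge a b with hab | hab
    · rw [PySem.List.pyRange_one_cons hab, List.flatMap_cons, List.pairwise_append]
      refine ⟨hin a le_rfl hab,
        ih (a + 1) b (by omega) (fun d h1 h2 => hin d (by omega) h2)
          (fun d d' h1 h2 h3 => hsep d d' (by omega) h2 h3), ?_⟩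
      intro u hu v hv
      rw [List.mem_flatMap] at hv
      obtain ⟨d', hd', hv⟩ := hv
      have hb := PySem.List.mem_pyRange_one.mp hd'
      exact hsep a d' le_rfl (by omega) (by omega) u hu v hv
    · rw [PySem.List.pyRange_one_eq_nil (by omega)]; simp

-- membership characterisations
lemma pv_mem_A (start end_ m : Int) :
    m ∈ (PySem.List.pyRange start (end_ + 1) 1).filter (fun k => pvTest (PySem.Int.toChars k)) ↔
      start ≤ m ∧ m ≤ end_ ∧ pvQ m := by
  simp only [List.mem_filter, PySem.List.mem_pyRange_one, pv_test_iff]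
  constructor
  · rintro ⟨⟨h1, h2⟩, h3⟩; exact ⟨h1, by omega, h3⟩
  · rintro ⟨h1, h2, h3⟩; exact ⟨⟨h1, by omega⟩, h3⟩

lemma pv_mem_B (start end_ m : Int) (h : ¬ end_ < 11) :
    (m ∈ (PySem.List.pyRange 1 (PySem.Int.floordiv (PySem.Chars.len (PySem.Int.toChars end_)) 2 + 1) 1).flatMap
        (pvBlock start end_)) ↔ start ≤ m ∧ m ≤ end_ ∧ pvQ m := by
  have he : (11:Int) ≤ end_ := by omega
  have hLE : PySem.Chars.len (PySem.Int.toChars end_) = ((Nat.digits 10 end_.toNat).length : Int) :=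
    pv_len_toChars end_ (by omega)
  have hD2 : PySem.Int.floordiv (PySem.Chars.len (PySem.Int.toChars end_)) 2 =
      (((Nat.digits 10 end_.toNat).length / 2 : Nat) : Int) := by
    rw [hLE, PySem.Int.floordiv_eq_ediv_of_pos (by norm_num)]
    push_cast [Int.natCast_div]; ring
  rw [hD2]
  simp only [List.mem_flatMap]
  constructor
  · rintro ⟨d, hd, hm⟩
    have hb := PySem.List.mem_pyRange_one.mp hd
    have hd1 : 1 ≤ d := hb.1
    obtain ⟨hs, hee, x, h1, h2, hmx⟩ := (pv_mem_block start end_ d m hd1).mp hm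
    refine ⟨hs, hee, d.toNat, x.toNat, by omega, ?_, ?_, ?_⟩
    · have hx0 : (0:Int) ≤ x := le_trans (by positivity) h1
      have : ((10 ^ (d.toNat - 1) : Nat) : Int) ≤ ((x.toNat : Nat) : Int) := by
        push_cast; omega
      exact_mod_cast this
    · have hx0 : (0:Int) ≤ x := le_trans (by positivity) h1
      have : ((x.toNat : Nat) : Int) < ((10 ^ d.toNat : Nat) : Int) := by push_cast; omega
      exact_mod_cast this
    · have hx0 : (0:Int) ≤ x := le_trans (by positivity) h1
      rw [hmx, Int.toNat_of_nonneg hx0]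
  · rintro ⟨hs, hee, d, x, hd, hlo, hhi, rfl⟩
    have hcast : ((x:Int) * ((10:Int) ^ d + 1)) = ((x * (10 ^ d + 1) : Nat) : Int) := by
      norm_cast
    -- the half-length d fits below len(str(end_)) // 2
    have hlow : (10:Nat) ^ (2 * d - 1) ≤ x * (10 ^ d + 1) := by
      have p1 : (10:Nat) ^ (2 * d - 1) = 10 ^ (d - 1) * 10 ^ d := by
        rw [← pow_add]; congr 1; omega
      have hp : (0:Nat) < 10 ^ (d - 1) := by positivity
      rw [p1]; nlinarith
    have hle : x * (10 ^ d + 1) ≤ end_.toNat := by omega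
    have hlen : 2 * d - 1 < (Nat.digits 10 end_.toNat).length :=
      (Nat.lt_digits_length_iff (by norm_num) _).mpr (le_trans hlow hle)
    refine ⟨(d:Int), PySem.List.mem_pyRange_one.mpr ⟨by exact_mod_cast Nat.one_le_iff_ne_zero.mpr (by omega), by push_cast; omega⟩, ?_⟩
    rw [pv_mem_block start end_ d _ (by exact_mod_cast Nat.one_le_iff_ne_zero.mpr (by omega))]
    refine ⟨hs, hee, (x:Int), ?_, ?_, ?_⟩
    · have : ((10 ^ (d - 1) : Nat) : Int) ≤ ((x : Nat) : Int) := by exact_mod_cast hlo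
      simpa [Int.toNat_natCast] using this
    · have : ((x : Nat) : Int) < ((10 ^ d : Nat) : Int) := by exact_mod_cast hhi
      simpa [Int.toNat_natCast] using this
    · push_cast [Int.toNat_natCast]; ring

-- sortedness
lemma pv_pairwise_A (start end_ : Int) :
    ((PySem.List.pyRange start (end_ + 1) 1).filter (fun k => pvTest (PySem.Int.toChars k))).Pairwise (· < ·) := by
  exact List.Pairwise.sublist List.filter_sublist (PySem.List.pairwise_lt_pyRange_one _ _)

lemma pv_pairwise_B (start end_ : Int) (_h : ¬ end_ < 11) :
    ((PySem.List.pyRange 1 (PySem.Int.floordiv (PySem.Chars.len (PySem.Int.toChars end_)) 2 + 1) 1).flatMap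
        (pvBlock start end_)).Pairwise (· < ·) := by
  apply pv_pairwise_flatMap _ _ _ _ rfl
  · intro d hd _
    simp only [pvBlock]
    rw [List.pairwise_map]
    refine (PySem.List.pairwise_lt_pyRange_one _ _).imp ?_
    intro a b hab
    have hB : (0:Int) < 10 ^ d.toNat + 1 := by positivity
    exact mul_lt_mul_of_pos_right hab hB
  · intro d d' h1 h2 _ u hu v hv
    have b1 := pv_block_bounds start end_ d u h1 hu
    have b2 := pv_block_bounds start end_ d' v (by omega) hv
    have hmono : (10:Int) ^ (2 * d.toNat) ≤ 10 ^ (2 * d'.toNat - 1) :=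
      pow_le_pow_right₀ (by norm_num) (by omega)
    calc u < 10 ^ (2 * d.toNat) := b1.2
      _ ≤ 10 ^ (2 * d'.toNat - 1) := hmono
      _ ≤ v := b2.1

lemma pv_sorted_eq {l₁ l₂ : List Int} (h₁ : l₁.Pairwise (· < ·)) (h₂ : l₂.Pairwise (· < ·))
    (hm : ∀ a, a ∈ l₁ ↔ a ∈ l₂) : l₁ = l₂ := by
  have nd₁ : l₁.Nodup := h₁.imp ne_of_lt
  have nd₂ : l₂.Nodup := h₂.imp ne_of_lt
  exact List.Perm.eq_of_pairwise (fun a b _ _ h h' => le_antisymm h h')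
    (h₁.imp le_of_lt) (h₂.imp le_of_lt) ((List.perm_ext_iff_of_nodup nd₁ nd₂).mpr hm)

-- ===== VERDICT (by name: the statement is the Claim_ definition above) =====
theorem find_invalid_ids_spec : Claim_equal_find_invalid_ids := by
  intro start end_ _
  unfold Spec_find_invalid_ids
  by_cases h : end_ < 11
  · rw [pv_A_eq_filter]
    have : find_invalid_ids_alt start end_ = [] := by
      unfold find_invalid_ids_alt; simp [h]
    rw [this, List.filter_eq_nil_iff]
    intro k hk
    simp only [Bool.not_eq_true]
    rw [Bool.eq_false_iff]
    intro ht
    have h11 := pv_Q_ge_11 ((pv_test_iff k).mp ht)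
    have hk' := (PySem.List.mem_pyRange_one).mp hk
    omega
  · rw [pv_A_eq_filter, pv_B_eq_flatMap start end_ h]
    exact pv_sorted_eq (pv_pairwise_A start end_) (pv_pairwise_B start end_ h)
      (fun a => (pv_mem_A start end_ a).trans (pv_mem_B start end_ a h).symm)
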